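-- pv_equiv track=rewrite | github.com/IacobIlinca/Facultate | Year1/First semester/Python/divide&conquer/exista_impare.py | odd_numbers_in_list
-- ===== SOURCE A (Python) =====
-- def odd_numbers_in_list(lst):
--     if len(lst) == 0:
--         return False
--     if len(lst) == 1:
--         if lst[0] % 2 == 1:
--             return True
--         else:
--             return False
--     return (lst[0] % 2 == 1) or odd_numbers_in_list(lst[1:])
-- ===== SOURCE B (Python) =====
-- def odd_numbers_in_list(lst):
--     if len(lst) == 0:
--         return False
--     if len(lst) == 1:
--         return lst[0] % 2 == 1
--     mid = len(lst) // 2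
--     return odd_numbers_in_list(lst[:mid]) or odd_numbers_in_list(lst[mid:])
-- ===== Notes on version B (the rewrite author's own statement) =====
-- stated objective: alternative
-- what changed: Replaced A's head/tail linear recursion by a balanced divide-and-conquer that splits the list at the midpoint and combines the two halves with or.
import Mathlib
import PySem

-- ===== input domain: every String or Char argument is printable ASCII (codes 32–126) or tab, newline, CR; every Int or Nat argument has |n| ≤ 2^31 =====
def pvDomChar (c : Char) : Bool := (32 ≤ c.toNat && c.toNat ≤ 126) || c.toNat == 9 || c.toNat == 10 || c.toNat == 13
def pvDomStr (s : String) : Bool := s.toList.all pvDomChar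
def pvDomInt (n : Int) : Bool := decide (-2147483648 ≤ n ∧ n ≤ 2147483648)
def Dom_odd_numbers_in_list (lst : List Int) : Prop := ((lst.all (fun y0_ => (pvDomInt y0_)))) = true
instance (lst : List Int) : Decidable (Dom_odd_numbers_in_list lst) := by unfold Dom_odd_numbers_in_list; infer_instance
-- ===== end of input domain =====

-- B changes decomposition only: balanced divide-and-conquer instead of A's head/tail linear recursion (objective: alternative).
-- ===== PORT A =====
-- Linear head/tail recursion, literal transliteration of Source A.
def odd_numbers_in_list (lst : List Int) : Bool :=
  match lst with
  | [] => false
  | [x] => if PySem.Int.mod x 2 = 1 then true else false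
  | x :: rest => (PySem.Int.mod x 2 = 1) || odd_numbers_in_list rest

-- ===== PORT B =====
-- Termination facts for the midpoint split, cited by name in decreasing_by.
theorem pyFloordivTwo (n : Nat) : PySem.Int.floordiv (n:Int) 2 = ((n/2 : Nat) : Int) := by
  simp [PySem.Int.floordiv, Int.fdiv_eq_ediv]

theorem len_takeHalf_lt (lst : List Int) (h : 2 ≤ lst.length) :
    (PySem.List.slice lst none (some (PySem.Int.floordiv (lst.length:Int) 2))).length < lst.length := by
  rw [pyFloordivTwo, PySem.List.slice_to_natCast]
  simp
  omega

theorem len_dropHalf_lt (lst : List Int) (h : 2 ≤ lst.length) :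
    (PySem.List.slice lst (some (PySem.Int.floordiv (lst.length:Int) 2)) none).length < lst.length := by
  rw [pyFloordivTwo, PySem.List.slice_from_natCast]
  simp
  omega

-- Balanced divide-and-conquer: split at the midpoint, combine with || (Source B).
def odd_numbers_in_list_alt (lst : List Int) : Bool :=
  match h : lst with
  | [] => false
  | [x] => decide (PySem.Int.mod x 2 = 1)
  | _ :: _ :: _ =>
    let mid := PySem.Int.floordiv (lst.length : Int) 2
    odd_numbers_in_list_alt (PySem.List.slice lst none (some mid)) ||
    odd_numbers_in_list_alt (PySem.List.slice lst (some mid) none)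
termination_by lst.length
decreasing_by
  · rw [← h]
    exact len_takeHalf_lt lst (by simp [h])
  · rw [← h]
    exact len_dropHalf_lt lst (by simp [h])

-- ===== PRECONDITION & SPEC =====
def Spec_odd_numbers_in_list (lst : List Int) (out : Bool) : Prop := out = odd_numbers_in_list_alt lst
instance (lst : List Int) (out : Bool) : Decidable (Spec_odd_numbers_in_list lst out) := by unfold Spec_odd_numbers_in_list; infer_instance

-- ===== CLAIM (what is proved, stated in full; the proofs are below) =====
def Claim_equal_odd_numbers_in_list : Prop := ∀ (lst : List Int), Dom_odd_numbers_in_list lst → Spec_odd_numbers_in_list lst (odd_numbers_in_list lst)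

-- ===== LEMMAS AND PROOFS =====

-- Both ports compute `lst.any (is odd)`, via their different recursions.
theorem odd_a_eq_any (lst : List Int) :
    odd_numbers_in_list lst = lst.any (fun x => decide (PySem.Int.mod x 2 = 1)) := by
  match lst with
  | [] => simp [odd_numbers_in_list]
  | [x] => simp [odd_numbers_in_list]
  | x :: y :: rest =>
    have ih := odd_a_eq_any (y :: rest)
    simp [odd_numbers_in_list, ih]

theorem odd_b_eq_any (lst : List Int) :
    odd_numbers_in_list_alt lst = lst.any (fun x => decide (PySem.Int.mod x 2 = 1)) := by
  match h : lst with
  | [] => simp [odd_numbers_in_list_alt]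
  | [x] => simp [odd_numbers_in_list_alt]
  | a :: b :: rest =>
    rw [odd_numbers_in_list_alt]
    rw [odd_b_eq_any, odd_b_eq_any]
    rw [pyFloordivTwo, PySem.List.slice_to_natCast, PySem.List.slice_from_natCast]
    rw [← List.any_append, List.take_append_drop]
termination_by lst.length
decreasing_by
  · rw [← h]
    exact len_takeHalf_lt lst (by simp [h])
  · rw [← h]
    exact len_dropHalf_lt lst (by simp [h])

-- ===== VERDICT (by name: the statement is the Claim_ definition above) =====
theorem odd_numbers_in_list_spec : Claim_equal_odd_numbers_in_list := by
  intro lst _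
  unfold Spec_odd_numbers_in_list
  rw [odd_a_eq_any, odd_b_eq_any]
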